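-- pv_equiv track=rewrite | github.com/HappytestR/--- | ICS2020/algorithmtest/biaoqian.py | InitStat
-- ===== SOURCE A (Python) =====
-- def InitStat(records):  #从records中统计出user_tags和tag_items
--     user_tags=dict()  #records是存储标签的三元组records[i]=[user,item,tag]
--     tag_items=dict()
--     user_items=dict()
--     for user,item in records.items():
--         key1=records[user].keys()
--         for j in key1:
--             key2=records[user][j]
--             for tag in key2:
--                 user_tags.setdefault(user,{})
--                 user_tags[user][tag]=1
--                 tag_items.setdefault(tag,{})
--                 tag_items[tag][j]=1
--                 user_items.setdefault(user,{})
--                 user_items[user][j]=1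
--     return user_tags,user_items,tag_items
-- ===== SOURCE B (Python) =====
-- def InitStat(records):
--     # Flatten once into (user, item, tag) triples, then build each of the
--     # three inverted dicts by its own independent grouping pass.
--     def group(pairs):
--         out = dict()
--         for k, v in pairs:
--             out.setdefault(k, {})[v] = 1
--         return out
--     triples = [(user, item, tag)
--                for user, d in records.items()
--                for item, tags in d.items()
--                for tag in tags]
--     user_tags = group((u, t) for u, i, t in triples)
--     user_items = group((u, i) for u, i, t in triples)
--     tag_items = group((t, i) for u, i, t in triples)
--     return user_tags, user_items, tag_items
-- ===== Notes on version B (the rewrite author's own statement) =====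
-- stated objective: alternative
-- what changed: The single fused triply-nested loop that updates all three dicts at once (re-looking records up by key at each level) is replaced by one flattening comprehension into (user,item,tag) triples followed by three independent grouping passes, one per output dict; Pre_ only excludes association lists with duplicate outer or inner keys, which do not represent any Python dict.
import Mathlib
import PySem

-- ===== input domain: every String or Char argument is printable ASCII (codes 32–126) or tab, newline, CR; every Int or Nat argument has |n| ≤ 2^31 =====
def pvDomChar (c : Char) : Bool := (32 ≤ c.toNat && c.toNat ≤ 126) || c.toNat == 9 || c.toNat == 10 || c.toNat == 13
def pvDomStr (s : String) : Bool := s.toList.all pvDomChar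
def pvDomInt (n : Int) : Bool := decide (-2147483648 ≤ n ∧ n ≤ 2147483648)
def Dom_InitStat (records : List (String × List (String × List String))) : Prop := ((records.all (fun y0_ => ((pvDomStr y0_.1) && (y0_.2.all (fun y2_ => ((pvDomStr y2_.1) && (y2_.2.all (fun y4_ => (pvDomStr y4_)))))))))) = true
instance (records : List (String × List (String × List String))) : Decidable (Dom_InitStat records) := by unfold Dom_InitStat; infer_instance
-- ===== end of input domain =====

-- B replaces A's fused triply-nested dict-building loop by one flattening pass into
-- (user,item,tag) triples plus three independent grouping passes (objective: alternative).

-- ===== PORT A =====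
-- d.setdefault(k,{}) followed by d[k][v] = 1  (the in-place mutation of the inner dict
-- at key k is the overwrite-in-place insert at k; exact)
def pvSetTag (d : PySem.Dict String (PySem.Dict String Int)) (k v : String) :
    PySem.Dict String (PySem.Dict String Int) :=
  let d := d.setdefault k PySem.Dict.empty
  d.insert k ((d.getD k PySem.Dict.empty).insert v 1)

def InitStat (records : List (String × List (String × List String))) : (List (String × List (String × Int))) × (List (String × List (String × Int))) × (List (String × List (String × Int))) :=
  let st :=
    records.foldl
      (fun (st : PySem.Dict String (PySem.Dict String Int) ×
                 PySem.Dict String (PySem.Dict String Int) ×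
                 PySem.Dict String (PySem.Dict String Int)) p =>
        let user := p.1
        -- key1 = records[user].keys()
        let key1 := ((PySem.Dict.mk records).getD user []).map (·.1)
        key1.foldl
          (fun st j =>
            -- key2 = records[user][j]
            let key2 := (PySem.Dict.mk ((PySem.Dict.mk records).getD user [])).getD j []
            key2.foldl
              (fun st tag =>
                let ut := pvSetTag st.1 user tag
                let ti := pvSetTag st.2.2 tag j
                let ui := pvSetTag st.2.1 user j
                (ut, ui, ti)) st) st)
      (PySem.Dict.empty, PySem.Dict.empty, PySem.Dict.empty)
  (st.1.items.map (fun q => (q.1, q.2.items)),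
   st.2.1.items.map (fun q => (q.1, q.2.items)),
   st.2.2.items.map (fun q => (q.1, q.2.items)))

-- ===== PORT B =====
-- out.setdefault(k, {})[v] = 1 : exact as a single overwrite-in-place insert
def pvGroup (pairs : List (String × String)) : PySem.Dict String (PySem.Dict String Int) :=
  pairs.foldl
    (fun d p => d.insert p.1 ((d.getD p.1 PySem.Dict.empty).insert p.2 1))
    PySem.Dict.empty

def pvTriples (records : List (String × List (String × List String))) :
    List (String × String × String) :=
  records.flatMap (fun p => p.2.flatMap (fun q => q.2.map (fun t => (p.1, q.1, t))))

def InitStat_alt (records : List (String × List (String × List String))) : (List (String × List (String × Int))) × (List (String × List (String × Int))) × (List (String × List (String × Int))) :=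
  let trips := pvTriples records
  let user_tags := pvGroup (trips.map (fun x => (x.1, x.2.2)))
  let user_items := pvGroup (trips.map (fun x => (x.1, x.2.1)))
  let tag_items := pvGroup (trips.map (fun x => (x.2.2, x.2.1)))
  (user_tags.items.map (fun q => (q.1, q.2.items)),
   user_items.items.map (fun q => (q.1, q.2.items)),
   tag_items.items.map (fun q => (q.1, q.2.items)))

-- ===== PRECONDITION & SPEC =====
-- Pre_ excludes association lists with duplicate outer user keys or duplicate inner item
-- keys: such lists do not represent any Python dict (dict construction collapses the
-- duplicates before A runs), so first-vs-last-match behaviour there is nobody's to claim.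
def Pre_InitStat (records : List (String × List (String × List String))) : Prop :=
  (records.map (·.1)).Nodup ∧ ∀ p ∈ records, (p.2.map (·.1)).Nodup
instance (records : List (String × List (String × List String))) : Decidable (Pre_InitStat records) := by unfold Pre_InitStat; infer_instance

def pvWitness_InitStat : (List (String × List (String × List String))) :=
  [("u1", [("i1", ["t1", "t2"]), ("i2", ["t1"])]), ("u2", []), ("u3", [("i3", [])])]

def Spec_InitStat (records : List (String × List (String × List String))) (out : (List (String × List (String × Int))) × (List (String × List (String × Int))) × (List (String × List (String × Int)))) : Prop := out = InitStat_alt records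
instance (records : List (String × List (String × List String))) (out : (List (String × List (String × Int))) × (List (String × List (String × Int))) × (List (String × List (String × Int)))) : Decidable (Spec_InitStat records out) := by
  unfold Spec_InitStat
  have h1 : DecidableEq (List (String × List (String × Int))) := inferInstance
  have h2 : DecidableEq ((List (String × List (String × Int))) × (List (String × List (String × Int)))) := inferInstance
  exact @instDecidableEqProd _ _ h1 h2 out (InitStat_alt records)

-- ===== CLAIM (what is proved, stated in full; the proofs are below) =====
def Claim_equal_InitStat : Prop := ∀ (records : List (String × List (String × List String))), Dom_InitStat records → Pre_InitStat records → Spec_InitStat records (InitStat records)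

-- ===== LEMMAS AND PROOFS =====

-- setdefault-then-set collapses to a single overwrite-in-place insert
theorem pvSetTag_eq (d : PySem.Dict String (PySem.Dict String Int)) (k v : String) :
    pvSetTag d k v = d.insert k ((d.getD k PySem.Dict.empty).insert v 1) := by
  unfold pvSetTag
  by_cases h : d.contains k = true
  · rw [PySem.Dict.setdefault_of_contains d _ h]
  · have h' : d.contains k = false := by simpa using h
    simp only [PySem.Dict.setdefault_of_not_contains d _ h',
        PySem.Dict.getD_insert_self, PySem.Dict.insert_insert_self,
        PySem.Dict.getD_of_not_contains d _ h']

-- a fold whose step acts componentwise splits into three folds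
theorem foldl_prod3 {α β γ δ : Type} (f1 : α → δ → α) (f2 : β → δ → β) (f3 : γ → δ → γ)
    (l : List δ) (a : α) (b : β) (c : γ) :
    l.foldl (fun st x => (f1 st.1 x, f2 st.2.1 x, f3 st.2.2 x)) (a, b, c)
      = (l.foldl f1 a, l.foldl f2 b, l.foldl f3 c) := by
  induction l generalizing a b c with
  | nil => rfl
  | cons x xs ih => simp only [List.foldl_cons]; exact ih _ _ _

theorem foldl_flatMap {α β γ : Type} (g : β → List γ) (f : α → γ → α) (l : List β) (a : α) :
    (l.flatMap g).foldl f a = l.foldl (fun a x => (g x).foldl f a) a := by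
  induction l generalizing a with
  | nil => rfl
  | cons x xs ih => simp [List.flatMap_cons, List.foldl_append, ih]

-- first-match lookup in a nodup association list
theorem mk_getD_of_mem {ν : Type} (xs : List (String × ν)) (k : String) (v dflt : ν)
    (hmem : (k, v) ∈ xs) (hnd : (xs.map (·.1)).Nodup) :
    (PySem.Dict.mk xs).getD k dflt = v := by
  exact PySem.Dict.getD_of_mem_items (PySem.Dict.mk xs) hmem (by simpa [PySem.Dict.keys] using hnd) dflt

-- under Pre_, A's fused fold is the componentwise fold over the flattened triples
theorem fused_eq_triples (records : List (String × List (String × List String)))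
    (hpre : Pre_InitStat records)
    (st : PySem.Dict String (PySem.Dict String Int) ×
          PySem.Dict String (PySem.Dict String Int) ×
          PySem.Dict String (PySem.Dict String Int)) :
    records.foldl
      (fun st p =>
        (((PySem.Dict.mk records).getD p.1 []).map (·.1)).foldl
          (fun st j =>
            ((PySem.Dict.mk ((PySem.Dict.mk records).getD p.1 [])).getD j []).foldl
              (fun st tag =>
                (pvSetTag st.1 p.1 tag, pvSetTag st.2.1 p.1 j, pvSetTag st.2.2 tag j))
              st) st) st
    = (pvTriples records).foldl
        (fun st x =>
          (pvSetTag st.1 x.1 x.2.2, pvSetTag st.2.1 x.1 x.2.1, pvSetTag st.2.2 x.2.2 x.2.1))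
        st := by
  obtain ⟨hout, hin⟩ := hpre
  unfold pvTriples
  rw [foldl_flatMap]
  apply PySem.List.foldl_congr_mem
  intro st p hp
  rw [mk_getD_of_mem records p.1 p.2 [] hp hout]
  rw [foldl_flatMap, List.foldl_map]
  apply PySem.List.foldl_congr_mem
  intro st q hq
  rw [mk_getD_of_mem p.2 q.1 q.2 [] hq (hin p hp), List.foldl_map]

-- ===== VERDICT (by name: the statement is the Claim_ definition above) =====
theorem InitStat_spec : Claim_equal_InitStat := by
  intro records _ hpre
  unfold Spec_InitStat InitStat InitStat_alt
  simp only [fused_eq_triples records hpre]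
  rw [foldl_prod3 (fun d (x : String × String × String) => pvSetTag d x.1 x.2.2)
        (fun d x => pvSetTag d x.1 x.2.1) (fun d x => pvSetTag d x.2.2 x.2.1)
        (pvTriples records) PySem.Dict.empty PySem.Dict.empty PySem.Dict.empty]
  simp only [pvGroup, List.foldl_map, pvSetTag_eq]
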